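-- pv_equiv track=rewrite | github.com/tkhstty/atCoder | BeginnersSelection/ABC085C.py | otoshidama
-- ===== SOURCE A (Python) =====
-- def otoshidama(N, Y):
--     for a in range(0, N + 1):
--         for b in range(0, N+1):
--             c = N - (a + b)
--             if 0 <= c <= N:
--                 a_amount = a * 10000
--                 b_amount = b * 5000
--                 c_amount = c * 1000
--                 if a_amount + b_amount + c_amount == Y:
--                     pattern = []
--                     pattern += [a, b, c]
--                     return " ".join(map(str, pattern))
--                 else:
--                     continue
--     return "-1 -1 -1"
-- ===== SOURCE B (Python) =====
-- def otoshidama(N, Y):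
--     # For each count a of 10000-bills, b is determined by the linear equation:
--     # 10000a + 5000b + 1000(N - a - b) = Y  =>  4000b = Y - 1000N - 9000a.
--     for a in range(N + 1):
--         r = Y - 1000 * N - 9000 * a
--         if r >= 0 and r % 4000 == 0:
--             b = r // 4000
--             if a + b <= N:
--                 return " ".join([str(a), str(b), str(N - a - b)])
--     return "-1 -1 -1"
-- ===== Notes on version B (the rewrite author's own statement) =====
-- stated objective: faster
-- what changed: Replaces the O(N^2) nested scan over (a,b) by a single loop over a that solves b directly from the linear equation 4000b = Y - 1000N - 9000a and checks divisibility and bounds.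
import Mathlib
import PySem

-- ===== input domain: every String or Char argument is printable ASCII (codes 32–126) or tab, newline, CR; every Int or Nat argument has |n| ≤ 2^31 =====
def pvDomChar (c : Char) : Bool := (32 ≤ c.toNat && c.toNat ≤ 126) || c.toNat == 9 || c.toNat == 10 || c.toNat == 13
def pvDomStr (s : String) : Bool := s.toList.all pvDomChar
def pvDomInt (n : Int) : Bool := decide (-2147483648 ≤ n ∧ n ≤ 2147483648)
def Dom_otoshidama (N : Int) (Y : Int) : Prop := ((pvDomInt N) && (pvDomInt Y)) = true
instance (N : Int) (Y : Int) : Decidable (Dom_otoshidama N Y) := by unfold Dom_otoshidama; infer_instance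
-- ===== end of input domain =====

-- B replaces A's O(N^2) nested (a,b) scan by a single loop over a that solves b from the
-- linear equation 4000*b = Y - 1000*N - 9000*a (faster: asymptotic, measured by the check).

-- ===== PORT A =====
-- inner 'for b in range(0, N+1)' with early return
def otoInner (N Y a : Int) : List Int → Option String
  | [] => none
  | b :: bs =>
    let c := N - (a + b)
    if 0 ≤ c ∧ c ≤ N then
      let a_amount := a * 10000
      let b_amount := b * 5000
      let c_amount := c * 1000
      if a_amount + b_amount + c_amount = Y then
        some (PySem.Str.join " " ([a, b, c].map PySem.Int.toStr))
      else otoInner N Y a bs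
    else otoInner N Y a bs

-- outer 'for a in range(0, N+1)'
def otoOuter (N Y : Int) : List Int → Option String
  | [] => none
  | a :: as =>
    match otoInner N Y a (PySem.List.pyRange 0 (N + 1) 1) with
    | some s => some s
    | none => otoOuter N Y as

def otoshidama (N : Int) (Y : Int) : String :=
  (otoOuter N Y (PySem.List.pyRange 0 (N + 1) 1)).getD "-1 -1 -1"

-- ===== PORT B =====
-- body of B's single loop for one value of a
def otoStep (N Y a : Int) : Option String :=
  let r := Y - 1000 * N - 9000 * a
  if 0 ≤ r ∧ PySem.Int.mod r 4000 = 0 then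
    let b := PySem.Int.floordiv r 4000
    if a + b ≤ N then
      some (PySem.Str.join " " [PySem.Int.toStr a, PySem.Int.toStr b, PySem.Int.toStr (N - a - b)])
    else none
  else none

-- 'for a in range(N+1)' with early return
def otoLoopB (N Y : Int) : List Int → Option String
  | [] => none
  | a :: as =>
    match otoStep N Y a with
    | some s => some s
    | none => otoLoopB N Y as

def otoshidama_alt (N : Int) (Y : Int) : String :=
  (otoLoopB N Y (PySem.List.pyRange 0 (N + 1) 1)).getD "-1 -1 -1"

-- ===== PRECONDITION & SPEC =====
def Spec_otoshidama (N : Int) (Y : Int) (out : String) : Prop := out = otoshidama_alt N Y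
instance (N : Int) (Y : Int) (out : String) : Decidable (Spec_otoshidama N Y out) := by unfold Spec_otoshidama; infer_instance

-- ===== CLAIM (what is proved, stated in full; the proofs are below) =====
def Claim_equal_otoshidama : Prop := ∀ (N : Int) (Y : Int), Dom_otoshidama N Y → Spec_otoshidama N Y (otoshidama N Y)

-- ===== LEMMAS AND PROOFS =====

-- A's inner loop skips every b on which its test fails
lemma otoInner_none (N Y a : Int) (bs : List Int)
    (hfail : ∀ b ∈ bs, ¬ ((0 ≤ N - (a + b) ∧ N - (a + b) ≤ N) ∧
        a * 10000 + b * 5000 + (N - (a + b)) * 1000 = Y)) :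
    otoInner N Y a bs = none := by
  induction bs with
  | nil => rfl
  | cons b bs ih =>
    have hb := hfail b (by simp)
    simp only [otoInner]
    split_ifs with h1 h2
    · exact absurd ⟨h1, h2⟩ hb
    · exact ih (fun x hx => hfail x (by simp [hx]))
    · exact ih (fun x hx => hfail x (by simp [hx]))

lemma otoInner_append_none (N Y a : Int) (xs ys : List Int)
    (hfail : ∀ b ∈ xs, ¬ ((0 ≤ N - (a + b) ∧ N - (a + b) ≤ N) ∧
        a * 10000 + b * 5000 + (N - (a + b)) * 1000 = Y)) :
    otoInner N Y a (xs ++ ys) = otoInner N Y a ys := by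
  induction xs with
  | nil => rfl
  | cons b bs ih =>
    have hb := hfail b (by simp)
    simp only [List.cons_append, otoInner]
    split_ifs with h1 h2
    · exact absurd ⟨h1, h2⟩ hb
    · exact ih (fun x hx => hfail x (by simp [hx]))
    · exact ih (fun x hx => hfail x (by simp [hx]))

-- for each fixed a ≥ 0, A's inner scan over [0..N] returns exactly what B's step computes
lemma inner_eq_step (N Y a : Int) (ha : 0 ≤ a) :
    otoInner N Y a (PySem.List.pyRange 0 (N + 1) 1) = otoStep N Y a := by
  have hmm := PySem.Int.floordiv_mul_add_mod (Y - 1000 * N - 9000 * a) 4000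
  set b0 := PySem.Int.floordiv (Y - 1000 * N - 9000 * a) 4000 with hb0def
  by_cases hm : PySem.Int.mod (Y - 1000 * N - 9000 * a) 4000 = 0
  · rw [hm] at hmm
    by_cases hgood : 0 ≤ Y - 1000 * N - 9000 * a ∧ a + b0 ≤ N
    · -- hit: the unique solution b0 lies in [0, N]
      obtain ⟨hr, hab⟩ := hgood
      have hb0nn : 0 ≤ b0 := by omega
      have hb0N : b0 ≤ N := by omega
      rw [PySem.List.pyRange_one_append 0 b0 (N + 1) (by omega) (by omega),
          PySem.List.pyRange_one_cons (by omega : b0 < N + 1)]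
      rw [otoInner_append_none]
      · simp only [otoInner]
        rw [if_pos (by constructor <;> omega), if_pos (by omega)]
        simp only [otoStep]
        rw [if_pos ⟨hr, hm⟩, ← hb0def, if_pos hab]
        have : N - (a + b0) = N - a - b0 := by ring
        simp [this]
      · intro b hb h
        rw [PySem.List.mem_pyRange_one] at hb
        omega
    · -- miss: B returns none, and no b in [0..N] passes A's test
      have hstep : otoStep N Y a = none := by
        simp only [otoStep]
        rw [← hb0def]
        by_cases h1 : 0 ≤ Y - 1000 * N - 9000 * a ∧ PySem.Int.mod (Y - 1000 * N - 9000 * a) 4000 = 0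
        · rw [if_pos h1, if_neg (by omega)]
        · rw [if_neg h1]
      rw [hstep]
      apply otoInner_none
      intro b hb h
      rw [PySem.List.mem_pyRange_one] at hb
      omega
  · -- no divisibility: both sides find nothing
    have hstep : otoStep N Y a = none := by
      simp only [otoStep]
      rw [if_neg (by intro h; exact hm h.2)]
    rw [hstep]
    apply otoInner_none
    intro b hb h
    rw [PySem.List.mem_pyRange_one] at hb
    have hdvd : (4000 : Int) ∣ (Y - 1000 * N - 9000 * a) := ⟨b, by omega⟩
    exact hm ((PySem.Int.mod_eq_zero_iff_dvd _ _).mpr hdvd)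

lemma outer_eq (N Y : Int) (as : List Int) (h : ∀ a ∈ as, 0 ≤ a) :
    otoOuter N Y as = otoLoopB N Y as := by
  induction as with
  | nil => rfl
  | cons a as ih =>
    simp only [otoOuter, otoLoopB]
    rw [inner_eq_step N Y a (h a (by simp))]
    cases otoStep N Y a <;> simp [ih (fun x hx => h x (by simp [hx]))]

-- ===== VERDICT (by name: the statement is the Claim_ definition above) =====
theorem otoshidama_spec : Claim_equal_otoshidama := by
  intro N Y _
  show otoshidama N Y = otoshidama_alt N Y
  unfold otoshidama otoshidama_alt
  rw [outer_eq]
  intro a ha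
  rw [PySem.List.mem_pyRange_one] at ha
  omega
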